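-- pv_equiv track=rewrite | github.com/baizhen2/NRackMonitor | skumonitor.py | search
-- ===== SOURCE A (Python) =====
-- def search(found, toBeSearchedGood, toBeSearchedBad):
--     found_items = []
--     itHasBeenFound = False
--
--     #searches the good list first
--     for items in found:
--         if items in toBeSearchedGood:
--             itHasBeenFound = True
--             found_items.append(items)
--         #bad list search
--         if itHasBeenFound == False:
--             if items not in toBeSearchedBad:
--                 found_items.append(items)
--
--     #returns new and good skus
--     return found_items
-- ===== SOURCE B (Python) =====
-- def search(found, toBeSearchedGood, toBeSearchedBad):
--     # locate the first item that is in the good list (len(found) if none)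
--     split = len(found)
--     for k, x in enumerate(found):
--         if x in toBeSearchedGood:
--             split = k
--             break
--     # before that point: keep items not in the bad list; from it on: keep good items
--     return [x for x in found[:split] if x not in toBeSearchedBad] + \
--            [x for x in found[split:] if x in toBeSearchedGood]
-- ===== Notes on version B (the rewrite author's own statement) =====
-- stated objective: alternative
-- what changed: Replaces the single stateful loop with a sticky boolean flag by locating the index of the first good item and running two independent filter passes (bad-filter on the prefix, good-filter on the suffix).
import Mathlib
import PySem

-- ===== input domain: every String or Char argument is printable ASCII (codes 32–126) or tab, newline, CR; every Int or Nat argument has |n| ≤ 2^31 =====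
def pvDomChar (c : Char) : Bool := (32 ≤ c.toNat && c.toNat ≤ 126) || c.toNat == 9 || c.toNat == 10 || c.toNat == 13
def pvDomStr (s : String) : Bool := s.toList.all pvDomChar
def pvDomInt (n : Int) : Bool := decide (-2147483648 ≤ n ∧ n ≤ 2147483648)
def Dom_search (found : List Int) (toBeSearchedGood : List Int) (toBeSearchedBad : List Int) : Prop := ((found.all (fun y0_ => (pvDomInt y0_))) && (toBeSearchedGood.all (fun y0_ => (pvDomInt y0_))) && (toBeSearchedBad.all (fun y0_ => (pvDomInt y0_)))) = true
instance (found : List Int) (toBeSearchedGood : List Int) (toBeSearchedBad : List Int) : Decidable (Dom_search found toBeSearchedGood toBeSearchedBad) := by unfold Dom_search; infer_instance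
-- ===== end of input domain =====

-- B replaces A's single stateful loop (sticky flag) by locating the first good item's index
-- and running two independent filter passes; alternative decomposition, same cost.


-- ===== PORT A =====
-- the for-loop over `found` carrying (found_items, itHasBeenFound)
def searchLoop (good bad : List Int) (acc : List Int) (flag : Bool) : List Int → List Int
  | [] => acc
  | x :: rest =>
    let p : List Int × Bool := if good.contains x then (acc ++ [x], true) else (acc, flag)
    let acc2 : List Int := if p.2 = false then (if ¬ bad.contains x then p.1 ++ [x] else p.1) else p.1
    searchLoop good bad acc2 p.2 rest

def search (found : List Int) (toBeSearchedGood : List Int) (toBeSearchedBad : List Int) : List Int :=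
  searchLoop toBeSearchedGood toBeSearchedBad [] false found

-- ===== PORT B =====
def search_alt (found : List Int) (toBeSearchedGood : List Int) (toBeSearchedBad : List Int) : List Int :=
  let split := found.findIdx (fun x => toBeSearchedGood.contains x)
  (found.take split).filter (fun x => ¬ toBeSearchedBad.contains x)
    ++ (found.drop split).filter (fun x => toBeSearchedGood.contains x)

-- ===== PRECONDITION & SPEC =====
def Spec_search (found : List Int) (toBeSearchedGood : List Int) (toBeSearchedBad : List Int) (out : List Int) : Prop := out = search_alt found toBeSearchedGood toBeSearchedBad
instance (found : List Int) (toBeSearchedGood : List Int) (toBeSearchedBad : List Int) (out : List Int) : Decidable (Spec_search found toBeSearchedGood toBeSearchedBad out) := by unfold Spec_search; infer_instance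

-- ===== CLAIM (what is proved, stated in full; the proofs are below) =====
def Claim_equal_search : Prop := ∀ (found : List Int) (toBeSearchedGood : List Int) (toBeSearchedBad : List Int), Dom_search found toBeSearchedGood toBeSearchedBad → Spec_search found toBeSearchedGood toBeSearchedBad (search found toBeSearchedGood toBeSearchedBad)

-- ===== LEMMAS AND PROOFS =====

-- once the flag is set, the loop just filters the rest by the good list
theorem searchLoop_true (good bad : List Int) (acc : List Int) :
    ∀ (l : List Int), searchLoop good bad acc true l = acc ++ l.filter (fun x => good.contains x) := by
  intro l
  induction l generalizing acc with
  | nil => simp [searchLoop]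
  | cons x rest ih =>
    by_cases h : x ∈ good <;>
      simp [searchLoop, h, ih, List.append_assoc]

-- with the flag unset, the loop computes B's split-and-filter value
theorem searchLoop_false (good bad : List Int) :
    ∀ (l : List Int) (acc : List Int),
      searchLoop good bad acc false l =
        acc ++ ((l.take (l.findIdx (fun x => good.contains x))).filter (fun x => ¬ bad.contains x)
          ++ (l.drop (l.findIdx (fun x => good.contains x))).filter (fun x => good.contains x)) := by
  intro l
  induction l with
  | nil => intro acc; simp [searchLoop]
  | cons x rest ih =>
    intro acc
    by_cases h : x ∈ good
    · simp [searchLoop, h, searchLoop_true, List.findIdx_cons]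
    · by_cases hb : x ∈ bad <;>
        simp [searchLoop, h, hb, ih, List.findIdx_cons, List.append_assoc]

-- ===== VERDICT (by name: the statement is the Claim_ definition above) =====
theorem search_spec : Claim_equal_search := by
  intro found good bad _
  unfold Spec_search search search_alt
  simp [searchLoop_false]
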